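-- pv_equiv track=rewrite | github.com/ironbar/google_code_jam_python | challenges/2020/round_1a/pattern_matching/code.py | find_string_matching_all_patterns
-- ===== SOURCE A (Python) =====
-- def find_string_matching_all_patterns(patterns):
--     suffixes = [p.split('*')[-1] for p in patterns]
--     prefixes = [p.split('*')[0] for p in patterns]
--     centers = [get_center_pattern(p) for p in patterns]
--     common_suffix = find_common_suffix(suffixes)
--     common_prefix = find_common_prefix(prefixes)
--     if common_suffix is None or common_prefix is None:
--         return '*'
--     return common_prefix + ''.join(centers) + common_suffix
--
-- def find_common_suffix(suffixes):
--     longest_suffix = max(suffixes, key=len)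
--     for suffix in suffixes:
--         if not longest_suffix.endswith(suffix):
--             return None
--     return longest_suffix
--
-- def find_common_prefix(prefixes):
--     longest_prefix = max(prefixes, key=len)
--     for prefix in prefixes:
--         if not longest_prefix.startswith(prefix):
--             return None
--     return longest_prefix
--
-- def get_center_pattern(pattern):
--     splits = pattern.split('*')
--     if len(splits) > 2:
--         return ''.join(splits[1:-1])
--     return ''
-- ===== SOURCE B (Python) =====
-- def find_string_matching_all_patterns(patterns):
--     # One pass over patterns, merging a running common prefix/suffix and accumulating centers.
--     pref = suf = ''
--     ok = True
--     centers = []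
--     for p in patterns:
--         parts = p.split('*')
--         centers.append(''.join(parts[1:-1]))
--         a = parts[0]
--         if a.startswith(pref):
--             pref = a
--         elif not pref.startswith(a):
--             ok = False
--         b = parts[-1]
--         if b.endswith(suf):
--             suf = b
--         elif not suf.endswith(b):
--             ok = False
--     if not ok:
--         return '*'
--     return pref + ''.join(centers) + suf
-- ===== Notes on version B (the rewrite author's own statement) =====
-- stated objective: alternative
-- what changed: A builds three separate lists (prefixes, suffixes, centers) and twice takes the longest element and re-scans the whole list against it; B makes a single pass over the patterns, merging a running common prefix and common suffix pairwise and accumulating the centers as it goes.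
import Mathlib
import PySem

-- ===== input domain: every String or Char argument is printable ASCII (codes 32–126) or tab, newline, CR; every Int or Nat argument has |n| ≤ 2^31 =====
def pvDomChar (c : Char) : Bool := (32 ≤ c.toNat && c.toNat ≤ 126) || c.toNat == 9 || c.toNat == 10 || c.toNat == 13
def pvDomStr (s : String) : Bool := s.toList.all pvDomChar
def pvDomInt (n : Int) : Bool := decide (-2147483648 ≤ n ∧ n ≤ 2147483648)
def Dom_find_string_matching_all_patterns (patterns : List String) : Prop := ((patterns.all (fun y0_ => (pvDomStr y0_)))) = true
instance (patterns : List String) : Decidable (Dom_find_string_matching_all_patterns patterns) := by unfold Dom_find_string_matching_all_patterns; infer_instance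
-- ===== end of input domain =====

-- B replaces A's separate passes (prefix/suffix/center lists plus two max-then-check scans) by a single
-- fold over the patterns merging a running common prefix/suffix; A raises ValueError on [], excluded by Pre_
-- (B itself returns '' there).

-- ===== PORT A =====
-- p.split('*') : '*' ≠ '' so split? is always `some`; the .getD [] is never taken.
def pvSplitStar (p : String) : List String := (PySem.Str.split? p "*").getD []

def get_center_pattern (pattern : String) : String :=
  let splits := pvSplitStar pattern
  if splits.length > 2 then
    PySem.Str.join "" (PySem.List.slice splits (some 1) (some (-1)))
  else ""

-- Python's max([]) raises ValueError: max? returns none there; Pre_ excludes the empty input.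
def find_common_suffix (suffixes : List String) : Option String :=
  match PySem.List.max? suffixes (fun s => PySem.Str.len s) with
  | none => none
  | some longest =>
    if suffixes.all (fun suf => PySem.Str.endswith longest suf) then some longest else none

def find_common_prefix (prefixes : List String) : Option String :=
  match PySem.List.max? prefixes (fun s => PySem.Str.len s) with
  | none => none
  | some longest =>
    if prefixes.all (fun pre => PySem.Str.startswith longest pre) then some longest else none

-- split('*') is never empty, so the [-1] / [0] lookups always hit; the .getD "" is never taken.
def find_string_matching_all_patterns (patterns : List String) : String :=
  let suffixes := patterns.map (fun p => (PySem.List.pyGet? (pvSplitStar p) (-1)).getD "")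
  let prefixes := patterns.map (fun p => (PySem.List.pyGet? (pvSplitStar p) 0).getD "")
  let centers := patterns.map (fun p => get_center_pattern p)
  match find_common_suffix suffixes, find_common_prefix prefixes with
  | some common_suffix, some common_prefix =>
      common_prefix ++ PySem.Str.join "" centers ++ common_suffix
  | _, _ => "*"

-- ===== PORT B =====
-- one loop iteration of Source B: split, append the center, merge the prefix, merge the suffix
def pvStepB (st : String × String × Bool × List String) (p : String) : String × String × Bool × List String :=
  let parts := (PySem.Str.split? p "*").getD []
  let centers := st.2.2.2 ++ [PySem.Str.join "" (PySem.List.slice parts (some 1) (some (-1)))]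
  let a := (PySem.List.pyGet? parts 0).getD ""
  let prefOk : String × Bool :=
    if PySem.Str.startswith a st.1 then (a, st.2.2.1)
    else if PySem.Str.startswith st.1 a then (st.1, st.2.2.1)
    else (st.1, false)
  let b := (PySem.List.pyGet? parts (-1)).getD ""
  let sufOk : String × Bool :=
    if PySem.Str.endswith b st.2.1 then (b, prefOk.2)
    else if PySem.Str.endswith st.2.1 b then (st.2.1, prefOk.2)
    else (st.2.1, false)
  (prefOk.1, sufOk.1, sufOk.2, centers)

def find_string_matching_all_patterns_alt (patterns : List String) : String :=
  let st := patterns.foldl pvStepB ("", "", true, [])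
  if st.2.2.1 then st.1 ++ PySem.Str.join "" st.2.2.2 ++ st.2.1 else "*"

-- ===== PRECONDITION & SPEC =====
-- Pre_ excludes only the empty list, on which A raises ValueError (max() of an empty sequence).
def Pre_find_string_matching_all_patterns (patterns : List String) : Prop := patterns ≠ []
instance (patterns : List String) : Decidable (Pre_find_string_matching_all_patterns patterns) := by unfold Pre_find_string_matching_all_patterns; infer_instance
def pvWitness_find_string_matching_all_patterns : List String := (["a*b", "*b"])

def Spec_find_string_matching_all_patterns (patterns : List String) (out : String) : Prop := out = find_string_matching_all_patterns_alt patterns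
instance (patterns : List String) (out : String) : Decidable (Spec_find_string_matching_all_patterns patterns out) := by unfold Spec_find_string_matching_all_patterns; infer_instance

-- ===== CLAIM (what is proved, stated in full; the proofs are below) =====
def Claim_equal_find_string_matching_all_patterns : Prop := ∀ (patterns : List String), Dom_find_string_matching_all_patterns patterns → Pre_find_string_matching_all_patterns patterns → Spec_find_string_matching_all_patterns patterns (find_string_matching_all_patterns patterns)

-- ===== LEMMAS AND PROOFS =====

-- the generic merge step: R x y reads "x is below y" (is-prefix-of / is-suffix-of)
def pvMerge (R : String → String → Bool) (st : String × Bool) (a : String) : String × Bool :=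
  if R st.1 a then (a, st.2) else if R a st.1 then st else (st.1, false)

def pvRP (x y : String) : Bool := PySem.Str.startswith y x
def pvRS (x y : String) : Bool := PySem.Str.endswith y x

def pvPrefOf (p : String) : String := (PySem.List.pyGet? (pvSplitStar p) 0).getD ""
def pvSufOf (p : String) : String := (PySem.List.pyGet? (pvSplitStar p) (-1)).getD ""
def pvCenOf (p : String) : String := PySem.Str.join "" (PySem.List.slice (pvSplitStar p) (some 1) (some (-1)))

lemma pvMerge_point (R : String → String → Bool) (c : String) (b : Bool) (a : String) :
    pvMerge R (c, b) a = ((pvMerge R (c, true) a).1, b && (pvMerge R (c, true) a).2) := by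
  simp only [pvMerge]; split_ifs <;> simp

lemma pvMerge_split_pair (R : String → String → Bool) (ps : List String) (c : String) (b : Bool) :
    ps.foldl (pvMerge R) (c, b)
      = ((ps.foldl (pvMerge R) (c, true)).1, b && (ps.foldl (pvMerge R) (c, true)).2) := by
  induction ps generalizing c b with
  | nil => simp
  | cons a ps ih =>
    simp only [List.foldl_cons, pvMerge]
    by_cases h1 : R c a = true
    · simp only [h1, if_true]
      exact ih a b
    · by_cases h2 : R a c = true
      · simp only [h1, h2, Bool.false_eq_true, if_false, if_true]
        exact ih c b
      · simp only [h1, h2, Bool.false_eq_true, if_false]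
        rw [ih c false]
        simp

lemma pvMerge_split (R : String → String → Bool) (ps : List String) (st : String × Bool) :
    ps.foldl (pvMerge R) st
      = ((ps.foldl (pvMerge R) (st.1, true)).1, st.2 && (ps.foldl (pvMerge R) (st.1, true)).2) := by
  cases st with
  | mk c b => exact pvMerge_split_pair R ps c b

-- invariant of a successful merge fold: the result extends the seed, is the seed or an element,
-- and every element is below it
lemma pvMerge_inv (R : String → String → Bool)
    (hrefl : ∀ a, R a a = true)
    (htrans : ∀ a b c, R a b = true → R b c = true → R a c = true)
    (ps : List String) (c : String)
    (h : (ps.foldl (pvMerge R) (c, true)).2 = true) :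
    R c (ps.foldl (pvMerge R) (c, true)).1 = true
    ∧ ((ps.foldl (pvMerge R) (c, true)).1 = c ∨ (ps.foldl (pvMerge R) (c, true)).1 ∈ ps)
    ∧ (∀ p ∈ ps, R p (ps.foldl (pvMerge R) (c, true)).1 = true) := by
  induction ps generalizing c with
  | nil =>
    refine ⟨hrefl c, Or.inl rfl, ?_⟩
    intro p hp
    simp at hp
  | cons a ps ih =>
    simp only [List.foldl_cons, pvMerge] at h ⊢
    by_cases h1 : R c a = true
    · simp only [h1, if_true] at h ⊢
      obtain ⟨hra, hmem, hall⟩ := ih a h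
      refine ⟨htrans _ _ _ h1 hra, ?_, ?_⟩
      · rcases hmem with h' | h'
        · exact Or.inr (by rw [h']; exact List.mem_cons_self ..)
        · exact Or.inr (List.mem_cons_of_mem _ h')
      · intro p hp
        rcases List.mem_cons.mp hp with rfl | hp
        · exact hra
        · exact hall p hp
    · by_cases h2 : R a c = true
      · simp only [h1, h2, if_true, if_false] at h ⊢
        obtain ⟨hrc, hmem, hall⟩ := ih c h
        refine ⟨hrc, ?_, ?_⟩
        · rcases hmem with h' | h'
          · exact Or.inl h'
          · exact Or.inr (List.mem_cons_of_mem _ h')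
        · intro p hp
          rcases List.mem_cons.mp hp with rfl | hp
          · exact htrans _ _ _ h2 hrc
          · exact hall p hp
      · exfalso
        simp only [h1, h2, Bool.false_eq_true, if_false] at h
        rw [pvMerge_split R ps (c, false)] at h
        simp at h

-- a failed merge fold means there is no common upper bound at all
lemma pvMerge_fail (R : String → String → Bool)
    (hcomp : ∀ p q L, R p L = true → R q L = true → PySem.Str.len p ≤ PySem.Str.len q → R p q = true)
    (ps : List String) (c : String)
    (h : (ps.foldl (pvMerge R) (c, true)).2 = false) :
    ¬ ∃ M, R c M = true ∧ ∀ p ∈ ps, R p M = true := by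
  induction ps generalizing c with
  | nil => simp at h
  | cons a ps ih =>
    simp only [List.foldl_cons, pvMerge] at h
    rintro ⟨M, hcM, hall⟩
    have haM : R a M = true := hall a (List.mem_cons_self ..)
    by_cases h1 : R c a = true
    · simp only [h1, if_true] at h
      exact ih a h ⟨M, haM, fun p hp => hall p (List.mem_cons_of_mem _ hp)⟩
    · by_cases h2 : R a c = true
      · simp only [h1, h2, if_true, if_false] at h
        exact ih c h ⟨M, hcM, fun p hp => hall p (List.mem_cons_of_mem _ hp)⟩
      · rcases Int.le_total (PySem.Str.len a) (PySem.Str.len c) with hle | hle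
        · exact h2 (hcomp _ _ _ haM hcM hle)
        · exact h1 (hcomp _ _ _ hcM haM hle)

-- the generic "take the longest, check everything is below it" (A's shape)
def pvACommon (R : String → String → Bool) (xs : List String) : Option String :=
  match PySem.List.max? xs (fun s => PySem.Str.len s) with
  | none => none
  | some longest => if xs.all (fun p => R p longest) then some longest else none

lemma pvACommon_eq_merge (R : String → String → Bool)
    (hrefl : ∀ a, R a a = true)
    (htrans : ∀ a b c, R a b = true → R b c = true → R a c = true)
    (hbot : ∀ a, R "" a = true)
    (hcomp : ∀ p q L, R p L = true → R q L = true → PySem.Str.len p ≤ PySem.Str.len q → R p q = true)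
    (hanti : ∀ a b, R a b = true → PySem.Str.len b ≤ PySem.Str.len a → a = b)
    (hlen : ∀ a b, R a b = true → PySem.Str.len a ≤ PySem.Str.len b)
    (xs : List String) (hne : xs ≠ []) :
    pvACommon R xs
      = (if (xs.foldl (pvMerge R) ("", true)).2
         then some (xs.foldl (pvMerge R) ("", true)).1 else none) := by
  obtain ⟨m, hm⟩ : ∃ m, PySem.List.max? xs (fun s => PySem.Str.len s) = some m := by
    cases hmx : PySem.List.max? xs (fun s => PySem.Str.len s) with
    | none => exact absurd ((PySem.List.max?_eq_none_iff xs _).mp hmx) hne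
    | some m => exact ⟨m, rfl⟩
  have hmmem : m ∈ xs := PySem.List.max?_mem hm
  have hmmax : ∀ y ∈ xs, PySem.Str.len y ≤ PySem.Str.len m := PySem.List.max?_isMax hm
  unfold pvACommon
  rw [hm]
  simp only []
  by_cases hok : (xs.foldl (pvMerge R) ("", true)).2 = true
  · obtain ⟨-, hmem, hall⟩ := pvMerge_inv R hrefl htrans xs "" hok
    have hLmem : (xs.foldl (pvMerge R) ("", true)).1 ∈ xs := by
      rcases hmem with h' | h'
      · obtain ⟨x, t, rfl⟩ := List.exists_cons_of_ne_nil hne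
        have hx : R x (((x :: t).foldl (pvMerge R) ("", true)).1) = true :=
          hall x (List.mem_cons_self ..)
        have hxe : x = ((x :: t).foldl (pvMerge R) ("", true)).1 := by
          refine hanti x _ hx ?_
          rw [h']
          exact hlen _ _ (hbot x)
        rw [← hxe]; exact List.mem_cons_self ..
      · exact h'
    have hmL : m = (xs.foldl (pvMerge R) ("", true)).1 :=
      hanti m _ (hall m hmmem) (hmmax _ hLmem)
    have hallb : xs.all (fun p => R p m) = true :=
      List.all_eq_true.mpr (fun p hp => hmL ▸ hall p hp)
    show (if (xs.all fun p => R p m) = true then some m else none)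
        = if (xs.foldl (pvMerge R) ("", true)).2 = true then some (xs.foldl (pvMerge R) ("", true)).1 else none
    rw [if_pos hallb, if_pos hok, hmL]
  · have hok' : (xs.foldl (pvMerge R) ("", true)).2 = false := by simpa using hok
    have hno := pvMerge_fail R hcomp xs "" hok'
    have hnall : ¬ xs.all (fun p => R p m) = true := by
      intro hall
      exact hno ⟨m, hbot m, fun p hp => List.all_eq_true.mp hall p hp⟩
    show (if (xs.all fun p => R p m) = true then some m else none)
        = if (xs.foldl (pvMerge R) ("", true)).2 = true then some (xs.foldl (pvMerge R) ("", true)).1 else none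
    rw [if_neg hnall, hok']
    simp

-- properties of the two concrete relations
lemma pvLen_toList (s : String) : PySem.Str.len s = (s.toList.length : Int) := by
  simp [PySem.Str.len_eq]

lemma pvRP_iff (x y : String) : pvRP x y = true ↔ x.toList <+: y.toList := by
  simp [pvRP, PySem.Chars.startswith_iff]

lemma pvRS_iff (x y : String) : pvRS x y = true ↔ x.toList <:+ y.toList := by
  simp [pvRS, PySem.Chars.endswith_iff]

lemma pvRP_refl (a : String) : pvRP a a = true := (pvRP_iff a a).mpr (List.prefix_refl _)
lemma pvRP_trans (a b c : String) (h1 : pvRP a b = true) (h2 : pvRP b c = true) : pvRP a c = true :=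
  (pvRP_iff a c).mpr (((pvRP_iff a b).mp h1).trans ((pvRP_iff b c).mp h2))
lemma pvRP_bot (a : String) : pvRP "" a = true := (pvRP_iff "" a).mpr (by simp)
lemma pvRP_len (a b : String) (h : pvRP a b = true) : PySem.Str.len a ≤ PySem.Str.len b := by
  rw [pvLen_toList, pvLen_toList]
  exact_mod_cast ((pvRP_iff a b).mp h).length_le
lemma pvRP_comp (p q L : String) (h1 : pvRP p L = true) (h2 : pvRP q L = true)
    (hle : PySem.Str.len p ≤ PySem.Str.len q) : pvRP p q = true := by
  refine (pvRP_iff p q).mpr (List.prefix_of_prefix_length_le ((pvRP_iff p L).mp h1)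
    ((pvRP_iff q L).mp h2) ?_)
  rw [pvLen_toList, pvLen_toList] at hle
  exact_mod_cast hle
lemma pvRP_anti (a b : String) (h : pvRP a b = true) (hle : PySem.Str.len b ≤ PySem.Str.len a) :
    a = b := by
  have h' := (pvRP_iff a b).mp h
  rw [pvLen_toList, pvLen_toList] at hle
  exact String.toList_inj.mp (h'.eq_of_length (le_antisymm h'.length_le (by exact_mod_cast hle)))

lemma pvRS_refl (a : String) : pvRS a a = true := (pvRS_iff a a).mpr (List.suffix_refl _)
lemma pvRS_trans (a b c : String) (h1 : pvRS a b = true) (h2 : pvRS b c = true) : pvRS a c = true :=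
  (pvRS_iff a c).mpr (((pvRS_iff a b).mp h1).trans ((pvRS_iff b c).mp h2))
lemma pvRS_bot (a : String) : pvRS "" a = true := (pvRS_iff "" a).mpr (by simp)
lemma pvRS_len (a b : String) (h : pvRS a b = true) : PySem.Str.len a ≤ PySem.Str.len b := by
  rw [pvLen_toList, pvLen_toList]
  exact_mod_cast ((pvRS_iff a b).mp h).length_le
lemma pvRS_comp (p q L : String) (h1 : pvRS p L = true) (h2 : pvRS q L = true)
    (hle : PySem.Str.len p ≤ PySem.Str.len q) : pvRS p q = true := by
  refine (pvRS_iff p q).mpr (List.suffix_of_suffix_length_le ((pvRS_iff p L).mp h1)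
    ((pvRS_iff q L).mp h2) ?_)
  rw [pvLen_toList, pvLen_toList] at hle
  exact_mod_cast hle
lemma pvRS_anti (a b : String) (h : pvRS a b = true) (hle : PySem.Str.len b ≤ PySem.Str.len a) :
    a = b := by
  have h' := (pvRS_iff a b).mp h
  rw [pvLen_toList, pvLen_toList] at hle
  exact String.toList_inj.mp (h'.eq_of_length (le_antisymm h'.length_le (by exact_mod_cast hle)))

-- one step of B's fold, written through pvMerge
lemma pvStepB_eq (pref suf : String) (ok : Bool) (cs : List String) (p : String) :
    pvStepB (pref, suf, ok, cs) p
      = ((pvMerge pvRP (pref, ok) (pvPrefOf p)).1,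
         (pvMerge pvRS (suf, (pvMerge pvRP (pref, ok) (pvPrefOf p)).2) (pvSufOf p)).1,
         (pvMerge pvRS (suf, (pvMerge pvRP (pref, ok) (pvPrefOf p)).2) (pvSufOf p)).2,
         cs ++ [pvCenOf p]) := by
  simp only [pvStepB, pvMerge, pvRP, pvRS, pvPrefOf, pvSufOf, pvCenOf, pvSplitStar]

-- the decomposition of B's fold into three independent folds
lemma pvStep_decomp (ps : List String) (pref suf : String) (ok : Bool) (cs : List String) :
    ps.foldl pvStepB (pref, suf, ok, cs)
      = (((ps.map pvPrefOf).foldl (pvMerge pvRP) (pref, true)).1,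
         ((ps.map pvSufOf).foldl (pvMerge pvRS) (suf, true)).1,
         ok && ((ps.map pvPrefOf).foldl (pvMerge pvRP) (pref, true)).2
            && ((ps.map pvSufOf).foldl (pvMerge pvRS) (suf, true)).2,
         cs ++ ps.map pvCenOf) := by
  induction ps generalizing pref suf ok cs with
  | nil => simp
  | cons p ps ih =>
    rw [List.foldl_cons, pvStepB_eq, ih, List.map_cons, List.map_cons, List.map_cons,
        List.foldl_cons, List.foldl_cons]
    rw [pvMerge_point pvRP pref ok, pvMerge_point pvRS suf]
    rw [pvMerge_split pvRP (ps.map pvPrefOf) (pvMerge pvRP (pref, true) (pvPrefOf p)),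
        pvMerge_split pvRS (ps.map pvSufOf) (pvMerge pvRS (suf, true) (pvSufOf p))]
    simp [Bool.and_assoc, Bool.and_comm, Bool.and_left_comm]

-- A's centers equal B's centers elementwise
lemma pvJoin_empty_nil : PySem.Str.join "" ([] : List String) = "" := by decide

lemma pvCenter_eq (p : String) : get_center_pattern p = pvCenOf p := by
  unfold get_center_pattern pvCenOf
  by_cases h : (pvSplitStar p).length > 2
  · simp [h]
  · have hsl : PySem.List.slice (pvSplitStar p) (some 1) (some (-1)) = [] := by
      rcases hs : pvSplitStar p with _ | ⟨a, _ | ⟨b, _ | ⟨c, t⟩⟩⟩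
      · simp [PySem.List.slice]
      · simp [PySem.List.slice]
      · simp [PySem.List.slice]
      · exfalso; rw [hs] at h; simp at h
    rw [hsl, pvJoin_empty_nil]
    simp [h]

lemma pvFcp_eq (xs : List String) : find_common_prefix xs = pvACommon pvRP xs := rfl
lemma pvFcs_eq (xs : List String) : find_common_suffix xs = pvACommon pvRS xs := rfl

-- ===== VERDICT (by name: the statement is the Claim_ definition above) =====
theorem find_string_matching_all_patterns_spec : Claim_equal_find_string_matching_all_patterns := by
  intro patterns _ hpre
  unfold Spec_find_string_matching_all_patterns
  unfold find_string_matching_all_patterns find_string_matching_all_patterns_alt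
  rw [pvStep_decomp]
  have hneP : patterns.map pvPrefOf ≠ [] := by simpa using hpre
  have hneS : patterns.map pvSufOf ≠ [] := by simpa using hpre
  have hcp := pvACommon_eq_merge pvRP pvRP_refl pvRP_trans pvRP_bot pvRP_comp pvRP_anti pvRP_len
    (patterns.map pvPrefOf) hneP
  have hcs := pvACommon_eq_merge pvRS pvRS_refl pvRS_trans pvRS_bot pvRS_comp pvRS_anti pvRS_len
    (patterns.map pvSufOf) hneS
  have hPl : patterns.map (fun p => (PySem.List.pyGet? (pvSplitStar p) 0).getD "")
      = patterns.map pvPrefOf := rfl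
  have hSl : patterns.map (fun p => (PySem.List.pyGet? (pvSplitStar p) (-1)).getD "")
      = patterns.map pvSufOf := rfl
  have hCl : patterns.map (fun p => get_center_pattern p) = patterns.map pvCenOf :=
    List.map_congr_left (fun p _ => pvCenter_eq p)
  simp only [hPl, hSl, hCl, pvFcp_eq, pvFcs_eq, hcp, hcs]
  by_cases hbp : ((patterns.map pvPrefOf).foldl (pvMerge pvRP) ("", true)).2 = true
  · by_cases hbs : ((patterns.map pvSufOf).foldl (pvMerge pvRS) ("", true)).2 = true
    · simp [hbp, hbs]
    · simp only [Bool.not_eq_true] at hbs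
      simp [hbp, hbs]
  · simp only [Bool.not_eq_true] at hbp
    simp [hbp]
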